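-- pv_equiv track=rewrite | github.com/ccctw-ma/leetcode | src/InterviewTest/23.4.25amazon.py | getMaximumGreyness
-- ===== SOURCE A (Python) =====
-- from typing import List, Tuple, Union, Optional
--
-- def getMaximumGreyness(pixels: List[str]):
--     m, n = len(pixels), len(pixels[0])
--     rowOne, rowZero = [0] * m ,[0] * m
--     colOne, colZero = [0] * n, [0] * n
--     for i in range(m):
--         c = 0
--         for j in range(n):
--             c += int(pixels[i][j] == '1')
--         rowOne[i], rowZero[i] = c, n - c
--     for j in range(n):
--         c = 0
--         for i in range(m):
--             c += int(pixels[i][j] == '1')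
--         colOne[j], colZero[j] = c, m - c
--     res = -(10 ** 10)
--     for i in range(m):
--         for j in range(n):
--             res = max(res, rowOne[i] + colOne[j] - rowZero[i] - colZero[j])
--     return res
-- ===== SOURCE B (Python) =====
-- from typing import List
--
--
-- def getMaximumGreyness(pixels: List[str]):
--     # separable maximum: best row difference + best column difference
--     m, n = len(pixels), len(pixels[0])
--     bestCol = max(2 * sum(row[j] == '1' for row in pixels) - m for j in range(n))
--     res = -(10 ** 10)
--     for row in pixels:
--         res = max(res, 2 * sum(ch == '1' for ch in row[:n]) - n + bestCol)
--     return res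
-- ===== Notes on version B (the rewrite author's own statement) =====
-- stated objective: simpler
-- what changed: B drops the four count arrays and the O(mn) nested maximization: it computes the best column difference with one max() over columns and a single running-max pass over rows (the maximized quantity is separable). Pre_ excludes grids whose first row is empty (n=0): there A's loops never run and it returns its untouched -(10**10) sentinel while B's max() over zero columns raises ValueError.
-- outside the precondition, e.g. on getMaximumGreyness(['']): A returns -10000000000, B raises ValueError
import Mathlib
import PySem

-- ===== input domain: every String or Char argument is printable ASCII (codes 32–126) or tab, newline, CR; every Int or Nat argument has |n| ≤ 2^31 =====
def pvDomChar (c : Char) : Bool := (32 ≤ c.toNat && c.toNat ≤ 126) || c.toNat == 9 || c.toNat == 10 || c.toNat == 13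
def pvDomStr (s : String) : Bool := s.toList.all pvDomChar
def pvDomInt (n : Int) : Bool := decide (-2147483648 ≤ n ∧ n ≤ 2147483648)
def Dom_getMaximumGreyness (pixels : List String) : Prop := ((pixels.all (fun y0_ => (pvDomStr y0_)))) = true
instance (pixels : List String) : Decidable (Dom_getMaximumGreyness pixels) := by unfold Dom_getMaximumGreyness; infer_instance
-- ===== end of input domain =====

-- B replaces A's four count arrays and nested i,j maximization by a separable computation
-- (best column difference via max(), one running-max pass over rows); simpler, same counting cost.

-- ===== PORT A =====
-- n = len(pixels[0])  (pyGet? none = IndexError; excluded by Pre_)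
def pvA_n (pixels : List String) : Int := PySem.Str.len ((PySem.List.pyGet? pixels 0).getD "")
-- inner 'c += int(pixels[i][j] == '1')' loop of the row pass (Str.pyGet? none = IndexError; excluded by Pre_)
def pvA_rowCnt (pixels : List String) (i : Int) : Int :=
  (PySem.List.pyRange 0 (pvA_n pixels) 1).foldl
    (fun c j => c + (if PySem.Str.pyGet? (PySem.List.pyGetD pixels i "") j = some '1' then (1 : Int) else 0)) 0
-- inner 'c += int(pixels[i][j] == '1')' loop of the column pass
def pvA_colCnt (pixels : List String) (j : Int) : Int :=
  (PySem.List.pyRange 0 (pixels.length : Int) 1).foldl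
    (fun c i => c + (if PySem.Str.pyGet? (PySem.List.pyGetD pixels i "") j = some '1' then (1 : Int) else 0)) 0

def getMaximumGreyness (pixels : List String) : Int :=
  let m : Int := pixels.length
  let n : Int := pvA_n pixels
  let rowOne : List Int := (PySem.List.pyRange 0 m 1).map (pvA_rowCnt pixels)
  let rowZero : List Int := rowOne.map (fun c => n - c)
  let colOne : List Int := (PySem.List.pyRange 0 n 1).map (pvA_colCnt pixels)
  let colZero : List Int := colOne.map (fun c => m - c)
  (PySem.List.pyRange 0 m 1).foldl (fun res i =>
    (PySem.List.pyRange 0 n 1).foldl (fun res j =>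
      max res (PySem.List.pyGetD rowOne i 0 + PySem.List.pyGetD colOne j 0
               - PySem.List.pyGetD rowZero i 0 - PySem.List.pyGetD colZero j 0)) res)
    (-(10 ^ 10))

-- ===== PORT B =====
-- 2 * sum(row[j] == '1' for row in pixels) - m   (one column's difference)
def pvB_colDiff (pixels : List String) (j : Int) : Int :=
  2 * pixels.foldl (fun s row => s + (if PySem.Str.pyGet? row j = some '1' then (1 : Int) else 0)) 0
    - (pixels.length : Int)
-- sum(ch == '1' for ch in row[:n])
def pvB_rowOnes (n : Int) (row : String) : Int :=
  (PySem.Str.slice row none (some n)).toList.foldl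
    (fun s ch => s + (if ch = '1' then (1 : Int) else 0)) 0

def getMaximumGreyness_alt (pixels : List String) : Int :=
  let n : Int := PySem.Str.len ((PySem.List.pyGet? pixels 0).getD "")
  -- max(...) over an empty range raises ValueError in Python; excluded by Pre_ (n ≥ 1)
  let bestCol : Int :=
    (PySem.List.max? ((PySem.List.pyRange 0 n 1).map (pvB_colDiff pixels)) (fun x => x)).getD 0
  pixels.foldl (fun res row => max res (2 * pvB_rowOnes n row - n + bestCol)) (-(10 ^ 10))

-- ===== PRECONDITION & SPEC =====
-- Pre_ = exactly where neither program raises: a non-empty grid (else pixels[0] is an IndexError for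
-- both), first row non-empty (n = 0 makes B's max() raise ValueError while A returns its untouched
-- -(10**10) sentinel), and every row at least n long (else pixels[i][j]/row[j] is an IndexError for both).
def Pre_getMaximumGreyness (pixels : List String) : Prop :=
  pixels ≠ [] ∧ 1 ≤ pvA_n pixels ∧ ∀ s ∈ pixels, pvA_n pixels ≤ PySem.Str.len s
instance (pixels : List String) : Decidable (Pre_getMaximumGreyness pixels) := by
  unfold Pre_getMaximumGreyness; infer_instance
def pvWitness_getMaximumGreyness : List String := ["10", "01"]

def Spec_getMaximumGreyness (pixels : List String) (out : Int) : Prop := out = getMaximumGreyness_alt pixels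
instance (pixels : List String) (out : Int) : Decidable (Spec_getMaximumGreyness pixels out) := by
  unfold Spec_getMaximumGreyness; infer_instance

-- ===== CLAIM (what is proved, stated in full; the proofs are below) =====
def Claim_equal_getMaximumGreyness : Prop := ∀ (pixels : List String), Dom_getMaximumGreyness pixels → Pre_getMaximumGreyness pixels → Spec_getMaximumGreyness pixels (getMaximumGreyness pixels)

-- ===== LEMMAS AND PROOFS =====

-- running max with an added constant distributes: fold of max(·, x + y) is max(acc, x + max of ys)
theorem pv_foldl_max_add (x : Int) (cs : List Int) : ∀ (a c0 : Int),
    List.foldl (fun b y => max b (x + y)) (max a (x + c0)) cs = max a (x + List.foldl max c0 cs) := by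
  induction cs with
  | nil => intro a c0; rfl
  | cons d t ih =>
      intro a c0
      simp only [List.foldl_cons]
      rw [max_assoc, max_add_add_left]
      exact ih a (max c0 d)

-- counting over range(n) with lookups = counting over take n of the char list
theorem pv_count_take (cs : List Char) (k : Nat) (hk : k ≤ cs.length) :
    (PySem.List.pyRange 0 (k : Int) 1).foldl
      (fun c j => c + (if PySem.List.pyGet? cs j = some '1' then (1 : Int) else 0)) 0
    = (cs.take k).foldl (fun s ch => s + (if ch = '1' then (1 : Int) else 0)) 0 := by
  have hlen : (cs.take k).length = k := by simp [hk]
  have h1 : (PySem.List.pyRange 0 (k : Int) 1).foldl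
      (fun c j => c + (if PySem.List.pyGet? cs j = some '1' then (1 : Int) else 0)) 0
      = (PySem.List.pyRange 0 ((cs.take k).length : Int) 1).foldl
        (fun c j => (fun (s : Int) (ch : Char) => s + (if ch = '1' then (1 : Int) else 0)) c
          (PySem.List.pyGetD (cs.take k) j ' ')) 0 := by
    rw [hlen]
    apply PySem.List.foldl_congr_mem
    intro acc j hj
    obtain ⟨hj0, hjk⟩ := (PySem.List.mem_pyRange_one).1 hj
    have hck : ((k : Int)) ≤ (cs.length : Int) := by exact_mod_cast hk
    have htk : ((cs.take k).length : Int) = (k : Int) := by exact_mod_cast congrArg Nat.cast hlen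
    rw [PySem.List.pyGet?_eq_some_getElem cs hj0 (by omega),
        PySem.List.pyGetD_eq_getElem (cs.take k) ' ' hj0 (by omega)]
    simp [List.getElem_take]
  rw [h1, PySem.List.foldl_pyRange_zero_pyGetD' (cs.take k) ' '
        (fun (s : Int) (ch : Char) => s + (if ch = '1' then (1 : Int) else 0)) 0]

-- A's column count = B's column fold over the rows
theorem pv_col_eq (pixels : List String) (j : Int) :
    pvA_colCnt pixels j
    = pixels.foldl (fun s row => s + (if PySem.Str.pyGet? row j = some '1' then (1 : Int) else 0)) 0 := by
  unfold pvA_colCnt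
  exact PySem.List.foldl_pyRange_zero_pyGetD' pixels ""
    (fun s row => s + (if PySem.Str.pyGet? row j = some '1' then (1 : Int) else 0)) 0

-- the j-fold of A's row pass, as a function of the row itself
def pvRowFold (n : Int) (row : String) : Int :=
  (PySem.List.pyRange 0 n 1).foldl
    (fun c j => c + (if PySem.Str.pyGet? row j = some '1' then (1 : Int) else 0)) 0

-- A's row count = B's slice count, for a row long enough
theorem pv_row_eq (n : Int) (row : String) (h0 : 0 ≤ n) (h : n ≤ (row.toList.length : Int)) :
    pvRowFold n row = pvB_rowOnes n row := by
  obtain ⟨k, rfl⟩ : ∃ k : Nat, n = (k : Int) := ⟨n.toNat, (Int.toNat_of_nonneg h0).symm⟩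
  have hk : k ≤ row.toList.length := by exact_mod_cast h
  unfold pvRowFold pvB_rowOnes
  rw [PySem.Str.toList_slice, PySem.Chars.slice_eq_listSlice, PySem.List.slice_to_natCast,
      ← pv_count_take row.toList k hk]
  apply PySem.List.foldl_congr_mem
  intro acc j hj
  simp [PySem.Str.pyGet?_eq]

-- ===== VERDICT (by name: the statement is the Claim_ definition above) =====
theorem getMaximumGreyness_spec : Claim_equal_getMaximumGreyness := by
  intro pixels _ hpre
  obtain ⟨hne, hn1, hrows⟩ := hpre
  unfold Spec_getMaximumGreyness getMaximumGreyness getMaximumGreyness_alt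
  simp only []
  set n := pvA_n pixels with hn
  have h0n : (0 : Int) < n := by omega
  set Cmax : Int :=
    ((PySem.List.pyRange 1 n).map (pvB_colDiff pixels)).foldl max (pvB_colDiff pixels 0) with hC
  have hbest :
      (PySem.List.max? ((PySem.List.pyRange 0 n).map (pvB_colDiff pixels)) (fun x => x)).getD 0
        = Cmax := by
    rw [PySem.List.pyRange_one_cons h0n, List.map_cons, PySem.List.max?_id_cons]; rfl
  have hinner : ∀ res X : Int,
      (PySem.List.pyRange 0 n).foldl (fun res j => max res (X + pvB_colDiff pixels j)) res
        = max res (X + Cmax) := by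
    intro res X
    rw [← List.foldl_map (f := pvB_colDiff pixels) (g := fun b y => max b (X + y)),
        PySem.List.pyRange_one_cons h0n, List.map_cons]
    simp only [List.foldl_cons]
    rw [pv_foldl_max_add]
    norm_num
    rfl
  have hstep1 :
      (PySem.List.pyRange 0 (pixels.length : Int)).foldl (fun res i =>
        (PySem.List.pyRange 0 n).foldl (fun res j =>
          max res (PySem.List.pyGetD ((PySem.List.pyRange 0 (pixels.length : Int)).map (pvA_rowCnt pixels)) i 0
            + PySem.List.pyGetD ((PySem.List.pyRange 0 n).map (pvA_colCnt pixels)) j 0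
            - PySem.List.pyGetD (((PySem.List.pyRange 0 (pixels.length : Int)).map (pvA_rowCnt pixels)).map (fun c => n - c)) i 0
            - PySem.List.pyGetD (((PySem.List.pyRange 0 n).map (pvA_colCnt pixels)).map (fun c => (pixels.length : Int) - c)) j 0)) res)
        (-(10 ^ 10))
      = (PySem.List.pyRange 0 (pixels.length : Int)).foldl (fun res i =>
          max res ((2 * pvA_rowCnt pixels i - n) + Cmax)) (-(10 ^ 10)) := by
    apply PySem.List.foldl_congr_mem
    intro res i hi
    obtain ⟨hi0, him⟩ := PySem.List.mem_pyRange_one.1 hi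
    rw [← hinner res (2 * pvA_rowCnt pixels i - n)]
    apply PySem.List.foldl_congr_mem
    intro acc j hj
    obtain ⟨hj0, hjn⟩ := PySem.List.mem_pyRange_one.1 hj
    rw [List.map_map, List.map_map,
        PySem.List.pyGetD_map_pyRange_of_nonneg (pvA_rowCnt pixels) _ i _ hi0 him,
        PySem.List.pyGetD_map_pyRange_of_nonneg (pvA_colCnt pixels) _ j _ hj0 hjn,
        PySem.List.pyGetD_map_pyRange_of_nonneg ((fun c => n - c) ∘ pvA_rowCnt pixels) _ i _ hi0 him,
        PySem.List.pyGetD_map_pyRange_of_nonneg ((fun c => (pixels.length : Int) - c) ∘ pvA_colCnt pixels) _ j _ hj0 hjn]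
    simp only [Function.comp]
    simp only [pv_col_eq]
    unfold pvB_colDiff
    congr 1
    ring
  have hnn : PySem.Str.len ((PySem.List.pyGet? pixels 0).getD "") = n := rfl
  rw [hstep1, hnn, hbest]
  have hstep2 :
      (PySem.List.pyRange 0 (pixels.length : Int)).foldl (fun res i =>
        max res ((2 * pvA_rowCnt pixels i - n) + Cmax)) (-(10 ^ 10))
      = (PySem.List.pyRange 0 (pixels.length : Int)).foldl (fun res i =>
          (fun (r : Int) (row : String) => max r (2 * pvB_rowOnes n row - n + Cmax)) res
            (PySem.List.pyGetD pixels i "")) (-(10 ^ 10)) := by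
    apply PySem.List.foldl_congr_mem
    intro res i hi
    obtain ⟨hi0, him⟩ := PySem.List.mem_pyRange_one.1 hi
    have hmem : PySem.List.pyGetD pixels i "" ∈ pixels :=
      PySem.List.pyGetD_mem pixels "" (by unfold PySem.Raise.InRange; omega)
    have hlen : n ≤ ((PySem.List.pyGetD pixels i "").toList.length : Int) := by
      rw [← PySem.Str.len_eq]; exact hrows _ hmem
    have hrc : pvA_rowCnt pixels i = pvRowFold n (PySem.List.pyGetD pixels i "") := rfl
    rw [hrc, pv_row_eq n _ (le_of_lt h0n) hlen]
  rw [hstep2,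
      PySem.List.foldl_pyRange_zero_pyGetD' pixels ""
        (fun (r : Int) (row : String) => max r (2 * pvB_rowOnes n row - n + Cmax)) (-(10 ^ 10))]
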